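-- pv_equiv track=rewrite | github.com/t1sk3/euler | Python/euler052.py | checkTimes
-- ===== SOURCE A (Python) =====
-- from collections import OrderedDict
--
-- def checkTimes(num, tim):
--     timnum = num * tim
--     strnum = str(num)
--     strtimnum = str(timnum)
--     strtimnum = removeDupWithOrder(strtimnum)
--     strnum = removeDupWithOrder(strnum)
--     if len(strnum) != 6 or len(strtimnum) != 6:
--         return False
--     for letter in strtimnum:
--         if letter in strnum:
--             strnum = strnum[:strnum.index(letter)] + strnum[strnum.index(letter)+1:]
--     if len(strnum) == 0:
--         return True
--     return False
--
-- def removeDupWithOrder(str):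
--     return "".join(OrderedDict.fromkeys(str))
-- ===== SOURCE B (Python) =====
-- def checkTimes(num, tim):
--     s1 = set(str(num))
--     s2 = set(str(num * tim))
--     return len(s1) == 6 and len(s2) == 6 and s1 == s2
-- ===== Notes on version B (the rewrite author's own statement) =====
-- stated objective: simpler
-- what changed: Replaces the ordered dedup helper and the index-based one-by-one removal loop with two digit sets compared by set equality in a single expression.
import Mathlib
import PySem

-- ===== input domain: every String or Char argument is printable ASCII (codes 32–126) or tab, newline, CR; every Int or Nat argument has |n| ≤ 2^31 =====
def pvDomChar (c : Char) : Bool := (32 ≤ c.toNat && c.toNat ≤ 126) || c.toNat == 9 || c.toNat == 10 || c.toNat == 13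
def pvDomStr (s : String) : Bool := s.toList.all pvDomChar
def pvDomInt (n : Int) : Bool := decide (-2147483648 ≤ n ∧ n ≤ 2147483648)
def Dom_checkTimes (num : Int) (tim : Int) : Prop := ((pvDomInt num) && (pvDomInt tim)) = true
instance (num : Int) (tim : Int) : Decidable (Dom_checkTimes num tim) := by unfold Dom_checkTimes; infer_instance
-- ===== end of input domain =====

-- B replaces A's ordered dedup + index-based removal loop by comparing the two digit sets for equality (simpler, one expression).

-- ===== PORT A =====
-- removeDupWithOrder: "".join(OrderedDict.fromkeys(str)) = ordered dedup = PySem.List.dedup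
def pvRemoveDup (s : List Char) : List Char := PySem.List.dedup s

-- the for-loop: for letter in strtimnum: if letter in strnum: strnum = strnum[:i] + strnum[i+1:]
-- (i = strnum.index(letter); i is a valid nonneg index here, so the slices are take i / drop (i+1) — exact)
def pvRemoveLoop (sn : List Char) : List Char → List Char
  | [] => sn
  | c :: rest =>
      if sn.contains c then
        let i := (PySem.List.index? sn c).getD 0
        pvRemoveLoop (sn.take i ++ sn.drop (i + 1)) rest
      else
        pvRemoveLoop sn rest

def checkTimes (num : Int) (tim : Int) : Bool :=
  let timnum := num * tim
  let strnum := PySem.Int.toChars num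
  let strtimnum := PySem.Int.toChars timnum
  let strtimnum := pvRemoveDup strtimnum
  let strnum := pvRemoveDup strnum
  if strnum.length ≠ 6 ∨ strtimnum.length ≠ 6 then false
  else
    let strnum := pvRemoveLoop strnum strtimnum
    if strnum.length = 0 then true else false

-- ===== PORT B =====
def checkTimes_alt (num : Int) (tim : Int) : Bool :=
  let s1 := PySem.Set.ofList (PySem.Int.toChars num)
  let s2 := PySem.Set.ofList (PySem.Int.toChars (num * tim))
  PySem.Set.len s1 == 6 && PySem.Set.len s2 == 6 && PySem.Set.equal s1 s2

-- ===== PRECONDITION & SPEC =====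
def Spec_checkTimes (num : Int) (tim : Int) (out : Bool) : Prop := out = checkTimes_alt num tim
instance (num : Int) (tim : Int) (out : Bool) : Decidable (Spec_checkTimes num tim out) := by unfold Spec_checkTimes; infer_instance

-- ===== CLAIM (what is proved, stated in full; the proofs are below) =====
def Claim_equal_checkTimes : Prop := ∀ (num : Int) (tim : Int), Dom_checkTimes num tim → Spec_checkTimes num tim (checkTimes num tim)

-- ===== LEMMAS AND PROOFS =====

-- A's removal loop on a duplicate-free list filters out the letters occurring in t
theorem pvRemoveLoop_eq_filter (t sn : List Char) (h : sn.Nodup) :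
    pvRemoveLoop sn t = sn.filter (fun c => !t.contains c) := by
  induction t generalizing sn with
  | nil => simp [pvRemoveLoop]
  | cons c rest ih =>
    by_cases hc : c ∈ sn
    · have hcontains : sn.contains c = true := by simpa using hc
      have herase : sn.take ((PySem.List.index? sn c).getD 0) ++
          sn.drop ((PySem.List.index? sn c).getD 0 + 1) = sn.erase c := by
        rw [PySem.List.index?_eq_idxOf?]
        rw [List.erase_eq_eraseIdx sn c]
        cases hidx : List.idxOf? c sn with
        | none =>
          exfalso
          rw [List.idxOf?_eq_none_iff] at hidx
          exact hidx hc
        | some i => simp [List.eraseIdx_eq_take_drop_succ]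
      have hnd' : (sn.erase c).Nodup := h.erase c
      rw [pvRemoveLoop, if_pos hcontains]
      simp only [herase, ih _ hnd']
      rw [List.Nodup.erase_eq_filter h c]
      rw [List.filter_filter]
      apply List.filter_congr
      intro x _
      by_cases hx : x = c <;> simp [hx]
    · have hcontains : sn.contains c = false := by simpa using hc
      rw [pvRemoveLoop, if_neg (by simpa using hc)]
      rw [ih _ h]
      apply List.filter_congr
      intro x hx
      have hne : ¬ x = c := fun e => hc (e ▸ hx)
      simp [hne]


-- nodup lists of equal length: one-sided containment gives equal membership
theorem subset_iff_equal_of_nodup_len (s t : List Char) (hs : s.Nodup)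
    (hlen : s.length = t.length) (hsub : ∀ x ∈ s, x ∈ t) : ∀ x, x ∈ s ↔ x ∈ t := by
  have hperm : List.Perm s t :=
    (List.subperm_of_subset hs hsub).perm_of_length_le (le_of_eq hlen.symm)
  exact fun x => hperm.mem_iff

-- the core equality on deduplicated digit lists
theorem pvKey (s t : List Char) (hs : s.Nodup) (_ht : t.Nodup) :
    (if s.length ≠ 6 ∨ t.length ≠ 6 then false
     else if (pvRemoveLoop s t).length = 0 then true else false)
    = (PySem.Set.len s == 6 && PySem.Set.len t == 6 && PySem.Set.equal s t) := by
  by_cases h1 : s.length = 6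
  · by_cases h2 : t.length = 6
    · rw [if_neg (by simp [h1, h2])]
      have hB : (PySem.Set.equal s t = true) ↔ (∀ x, x ∈ s ↔ x ∈ t) := PySem.Set.equal_iff s t
      rw [pvRemoveLoop_eq_filter t s hs]
      by_cases heq : ∀ x, x ∈ s ↔ x ∈ t
      · simp [hB.mpr heq, PySem.Set.len, h1, h2]
        intro a ha
        exact (heq a).mp ha
      · have hne : PySem.Set.equal s t = false := by
          rw [Bool.eq_false_iff]; intro h; exact heq (hB.mp h)
        simp [hne]
        by_contra hno
        push Not at hno
        exact heq (subset_iff_equal_of_nodup_len s t hs (by rw [h1, h2]) hno)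
    · rw [if_pos (Or.inr h2)]
      have h2' : ((t.length : Int) == (6 : Int)) = false := by
        rw [beq_eq_false_iff_ne]
        intro h
        exact h2 (by exact_mod_cast h)
      simp only [PySem.Set.len, h2', Bool.and_false, Bool.false_and]
  · rw [if_pos (Or.inl h1)]
    have h1' : ((s.length : Int) == (6 : Int)) = false := by
      rw [beq_eq_false_iff_ne]
      intro h
      exact h1 (by exact_mod_cast h)
    simp only [PySem.Set.len, h1', Bool.false_and]

theorem checkTimes_eq (num tim : Int) : checkTimes num tim = checkTimes_alt num tim := by
  unfold checkTimes checkTimes_alt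
  simp only [pvRemoveDup, PySem.List.dedup_eq_ofList]
  exact pvKey _ _ (PySem.Set.nodup_ofList _) (PySem.Set.nodup_ofList _)

-- ===== VERDICT (by name: the statement is the Claim_ definition above) =====
theorem checkTimes_spec : Claim_equal_checkTimes := by
  intro num tim _
  unfold Spec_checkTimes
  exact checkTimes_eq num tim
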